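-- pv_equiv track=rewrite | github.com/kopok2/Algorithms | DynamicProgramming/OptimalPrinting.py | opp
-- ===== SOURCE A (Python) =====
-- def opp(n):
--     if n <= 6:
--         return n
--     dp = [0] * n
--     b = 0
--     for i in range(1, 7):
--         dp[i - 1] = i
--     for i in range(7, n + 1):
--         for b in range(i - 3, 0, -1):
--             curr = (i - b - 1) * dp[b - 1]
--             if curr > dp[i - 1]:
--                 dp[i - 1] = curr
--     return dp[n - 1]
-- ===== SOURCE B (Python) =====
-- def opp(n):
--     if n <= 6:
--         return n
--     window = [2, 3, 4, 5, 6]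
--     for i in range(7, n + 1):
--         window.append(max(3 * window[1], 4 * window[0]))
--         window.pop(0)
--     return window[-1]
-- ===== Notes on version B (the rewrite author's own statement) =====
-- stated objective: faster
-- what changed: A's quadratic DP scanning every earlier break point per keystroke count is replaced by a constant-size sliding-window recurrence taking the better of a triple-paste and a quadruple-paste step, proved to dominate all other break points.
import Mathlib
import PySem

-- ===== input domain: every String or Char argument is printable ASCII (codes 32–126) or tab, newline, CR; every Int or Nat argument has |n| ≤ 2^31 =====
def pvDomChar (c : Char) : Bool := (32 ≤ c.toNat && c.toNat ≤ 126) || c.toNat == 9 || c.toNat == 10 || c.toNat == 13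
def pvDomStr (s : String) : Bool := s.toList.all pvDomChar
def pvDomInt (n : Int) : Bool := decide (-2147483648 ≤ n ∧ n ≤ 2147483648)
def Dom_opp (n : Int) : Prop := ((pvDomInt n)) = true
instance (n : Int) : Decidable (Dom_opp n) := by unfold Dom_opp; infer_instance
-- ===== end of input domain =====

-- B replaces A's quadratic scan over all break points by the linear recurrence
-- dp[i] = max(3*dp[i-4], 4*dp[i-5]) kept in a 5-element sliding window (objective: faster).

-- ===== PORT A =====
-- Python indices dp[i-1], dp[b-1], dp[n-1] are provably nonnegative and in range here,
-- so reads are PySem.List.pyGetD and the assignment dp[i-1] = v is List.set (i-1).toNat v.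
def opp (n : Int) : Int :=
  if n ≤ 6 then n
  else
    let dp := List.replicate n.toNat (0 : Int)
    let dp := (PySem.List.pyRange 1 7 1).foldl (fun dp i => dp.set (i - 1).toNat i) dp
    let dp := (PySem.List.pyRange 7 (n + 1) 1).foldl (fun dp i =>
        (PySem.List.pyRange (i - 3) 0 (-1)).foldl (fun dp b =>
          let curr := (i - b - 1) * PySem.List.pyGetD dp (b - 1) 0
          if curr > PySem.List.pyGetD dp (i - 1) 0 then dp.set (i - 1).toNat curr else dp) dp) dp
    PySem.List.pyGetD dp (n - 1) 0

-- ===== PORT B =====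
-- window.append(v) then window.pop(0)  =  (w ++ [v]).tail ; window[-1] read via pyGetD.
def opp_alt (n : Int) : Int :=
  if n ≤ 6 then n
  else
    let w := (PySem.List.pyRange 7 (n + 1) 1).foldl (fun w _ =>
        let w := w ++ [max (3 * PySem.List.pyGetD w 1 0) (4 * PySem.List.pyGetD w 0 0)]
        w.tail) [2, 3, 4, 5, 6]
    PySem.List.pyGetD w (-1) 0

-- ===== PRECONDITION & SPEC =====
def Spec_opp (n : Int) (out : Int) : Prop := out = opp_alt n
instance (n : Int) (out : Int) : Decidable (Spec_opp n out) := by unfold Spec_opp; infer_instance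

-- ===== CLAIM (what is proved, stated in full; the proofs are below) =====
def Claim_equal_opp : Prop := ∀ (n : Int), Dom_opp n → Spec_opp n (opp n)

-- ===== LEMMAS AND PROOFS =====

-- The common mathematical value: mu i = best printable count for i keystrokes,
-- realised by a 5-window iteration so that the kernel can evaluate it.
def muStep (t : Int × Int × Int × Int × Int) : Int × Int × Int × Int × Int :=
  (t.2.1, t.2.2.1, t.2.2.2.1, t.2.2.2.2, max (3 * t.2.1) (4 * t.1))

def win : Nat → Int × Int × Int × Int × Int
  | 0 => (2, 3, 4, 5, 6)
  | k + 1 => muStep (win k)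

def mu (i : Nat) : Int := if i ≤ 1 then (i : Int) else (win (i - 2)).1

lemma mu_rec (i : Nat) (h : 7 ≤ i) : mu i = max (3 * mu (i - 4)) (4 * mu (i - 5)) := by
  obtain ⟨k, rfl⟩ : ∃ k, i = k + 7 := ⟨i - 7, by omega⟩
  show (win (k + 7 - 2)).1 = max (3 * mu (k + 3)) (4 * mu (k + 2))
  have h1 : k + 7 - 2 = (k + 4) + 1 := by omega
  have h2 : mu (k + 3) = (win (k + 1)).1 := rfl
  have h3 : mu (k + 2) = (win k).1 := rfl
  rw [h1, h2, h3]
  induction k with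
  | zero => rfl
  | succ m _ => rfl

lemma mu_le6 (i : Nat) (h : i ≤ 6) : mu i = (i : Int) := by
  interval_cases i <;> decide

lemma mu_nonneg (i : Nat) : 0 ≤ mu i := by
  induction i using Nat.strong_induction_on with
  | _ i ih =>
    by_cases h : i ≤ 6
    · rw [mu_le6 i h]; positivity
    · rw [mu_rec i (by omega)]
      have := ih (i - 4) (by omega)
      have h3 : (0:Int) ≤ 3 * mu (i - 4) := by positivity
      exact le_trans h3 (le_max_left _ _)

-- 2*mu(m+1) ≤ 3*mu m  for m ≥ 3
lemma mu_two_three (m : Nat) (h : 3 ≤ m) : 2 * mu (m + 1) ≤ 3 * mu m := by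
  induction m using Nat.strong_induction_on with
  | _ m ih =>
    by_cases hm : m ≤ 7
    · interval_cases m <;> decide
    · obtain ⟨k, rfl⟩ : ∃ k, m = k + 8 := ⟨m - 8, by omega⟩
      rw [mu_rec (k + 8 + 1) (by omega), mu_rec (k + 8) (by omega)]
      simp only [show k + 8 + 1 - 4 = k + 5 from by omega, show k + 8 + 1 - 5 = k + 4 from by omega,
        show k + 8 - 4 = k + 4 from by omega, show k + 8 - 5 = k + 3 from by omega]
      have i1 := ih (k + 4) (by omega) (by omega)
      have i2 := ih (k + 3) (by omega) (by omega)
      have l1 := le_max_left (3 * mu (k + 4)) (4 * mu (k + 3))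
      have l2 := le_max_right (3 * mu (k + 4)) (4 * mu (k + 3))
      rw [mul_max_of_nonneg _ _ (by norm_num : (0:Int) ≤ 2)]
      exact max_le (by linarith) (by linarith)

-- 3*mu m ≤ 2*mu(m+2)
lemma mu_three_two (m : Nat) : 3 * mu m ≤ 2 * mu (m + 2) := by
  induction m using Nat.strong_induction_on with
  | _ m ih =>
    by_cases hm : m ≤ 6
    · interval_cases m <;> decide
    · obtain ⟨k, rfl⟩ : ∃ k, m = k + 7 := ⟨m - 7, by omega⟩
      rw [mu_rec (k + 7) (by omega), mu_rec (k + 7 + 2) (by omega)]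
      simp only [show k + 7 - 4 = k + 3 from by omega, show k + 7 - 5 = k + 2 from by omega,
        show k + 7 + 2 - 4 = k + 5 from by omega, show k + 7 + 2 - 5 = k + 4 from by omega]
      have i1 := ih (k + 3) (by omega)
      have i2 := ih (k + 2) (by omega)
      have l1 := le_max_left (3 * mu (k + 5)) (4 * mu (k + 4))
      have l2 := le_max_right (3 * mu (k + 5)) (4 * mu (k + 4))
      rw [mul_max_of_nonneg _ _ (by norm_num : (0:Int) ≤ 3)]
      exact max_le (by linarith) (by linarith)

-- 5*mu m ≤ max (3*mu(m+2)) (4*mu(m+1))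
lemma mu_five (m : Nat) : 5 * mu m ≤ max (3 * mu (m + 2)) (4 * mu (m + 1)) := by
  induction m using Nat.strong_induction_on with
  | _ m ih =>
    by_cases hm : m ≤ 6
    · interval_cases m <;> decide
    · obtain ⟨k, rfl⟩ : ∃ k, m = k + 7 := ⟨m - 7, by omega⟩
      rw [mu_rec (k + 7) (by omega)]
      simp only [show k + 7 - 4 = k + 3 from by omega, show k + 7 - 5 = k + 2 from by omega]
      have i1 := ih (k + 3) (by omega)
      have i2 := ih (k + 2) (by omega)
      have e1 : max (3 * mu (k + 3 + 2)) (4 * mu (k + 3 + 1)) = mu (k + 7 + 2) := by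
        rw [mu_rec (k + 7 + 2) (by omega)]
        simp only [show k + 7 + 2 - 4 = k + 3 + 2 from by omega,
          show k + 7 + 2 - 5 = k + 3 + 1 from by omega]
      have e2 : max (3 * mu (k + 2 + 2)) (4 * mu (k + 2 + 1)) = mu (k + 7 + 1) := by
        rw [mu_rec (k + 7 + 1) (by omega)]
        simp only [show k + 7 + 1 - 4 = k + 2 + 2 from by omega,
          show k + 7 + 1 - 5 = k + 2 + 1 from by omega]
      rw [e1] at i1
      rw [e2] at i2
      have l1 := le_max_left (3 * mu (k + 7 + 2)) (4 * mu (k + 7 + 1))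
      have l2 := le_max_right (3 * mu (k + 7 + 2)) (4 * mu (k + 7 + 1))
      rw [mul_max_of_nonneg _ _ (by norm_num : (0:Int) ≤ 5)]
      exact max_le (by linarith) (by linarith)

-- the main bound: every break point b is dominated by mu i
lemma mu_bound (i b : Nat) (hi : 7 ≤ i) (hb : 1 ≤ b) (hbi : b + 3 ≤ i) :
    ((i : Int) - b - 1) * mu b ≤ mu i := by
  induction i using Nat.strong_induction_on generalizing b with
  | _ i ih =>
    by_cases hsmall : i ≤ 11
    · have hb8 : b ≤ 8 := by omega
      interval_cases i <;> interval_cases b <;> decide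
    · have hrec := mu_rec i (by omega)
      have hcast4 : ((i - 4 : Nat) : Int) = (i : Int) - 4 := by omega
      have hcast5 : ((i - 5 : Nat) : Int) = (i : Int) - 5 := by omega
      rcases (show b = i - 3 ∨ b = i - 4 ∨ b = i - 5 ∨ b = i - 6 ∨ b = i - 7 ∨ b + 8 ≤ i
        from by omega) with hc | hc | hc | hc | hc | hc
      · subst hc
        have hcb : ((i - 3 : Nat) : Int) = (i : Int) - 3 := by omega
        rw [hcb]
        have h1 := mu_two_three (i - 4) (by omega)
        rw [show i - 4 + 1 = i - 3 from by omega] at h1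
        have l1 := le_max_left (3 * mu (i - 4)) (4 * mu (i - 5))
        have : ((i : Int) - ((i : Int) - 3) - 1) = 2 := by ring
        rw [this, hrec]
        linarith
      · subst hc
        rw [hcast4, show ((i:Int) - ((i:Int) - 4) - 1) = 3 from by ring, hrec]
        exact le_max_left _ _
      · subst hc
        rw [hcast5, show ((i:Int) - ((i:Int) - 5) - 1) = 4 from by ring, hrec]
        exact le_max_right _ _
      · subst hc
        have hcb : ((i - 6 : Nat) : Int) = (i : Int) - 6 := by omega
        rw [hcb, show ((i:Int) - ((i:Int) - 6) - 1) = 5 from by ring, hrec]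
        have h1 := mu_five (i - 6)
        rw [show i - 6 + 2 = i - 4 from by omega, show i - 6 + 1 = i - 5 from by omega] at h1
        exact h1
      · subst hc
        have hcb : ((i - 7 : Nat) : Int) = (i : Int) - 7 := by omega
        rw [hcb, show ((i:Int) - ((i:Int) - 7) - 1) = 6 from by ring, hrec]
        have h1 := mu_three_two (i - 7)
        rw [show i - 7 + 2 = i - 5 from by omega] at h1
        have l2 := le_max_right (3 * mu (i - 4)) (4 * mu (i - 5))
        linarith
      · have h1 := ih (i - 5) (by omega) b (by omega) hb (by omega)
        rw [hcast5] at h1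
        have h4 : 4 * mu (i - 5) ≤ mu i := by rw [hrec]; exact le_max_right _ _
        have hp : 0 ≤ (3 * ((i : Int) - b) - 23) * mu b :=
          mul_nonneg (by omega) (mu_nonneg b)
        nlinarith [h1, h4, hp]

-- dp array contents after the first m entries are filled
def DD (N m : Nat) : List Int := (List.range N).map (fun j => if j < m then mu (j + 1) else 0)

lemma DD_length (N m : Nat) : (DD N m).length = N := by simp [DD]

lemma DD_get (N m : Nat) (j : Int) (h0 : 0 ≤ j) (h1 : j < (N : Int)) :
    PySem.List.pyGetD (DD N m) j 0 = if j.toNat < m then mu (j.toNat + 1) else 0 := by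
  rw [PySem.List.pyGetD_eq_getElem _ _ h0 (by rw [DD_length]; exact h1)]
  simp [DD]

lemma DD_set (N m : Nat) (_h : m < N) : (DD N m).set m (mu (m + 1)) = DD N (m + 1) := by
  apply List.ext_getElem (by simp [DD])
  intro j hj hj'
  simp only [DD, List.length_set, List.length_map, List.length_range] at hj hj'
  simp only [DD, List.getElem_set, List.getElem_map, List.getElem_range]
  by_cases hmj : m = j
  · subst hmj; simp
  · rw [if_neg hmj]
    split_ifs <;> first | rfl | omega

lemma foldl_max_le (t : List Int) (a c : Int) (h : a ≤ c) (h2 : ∀ y ∈ t, y ≤ c) :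
    t.foldl max a ≤ c := by
  induction t generalizing a with
  | nil => exact h
  | cons x xs ih =>
    exact ih (max a x) (max_le h (h2 x (by simp))) (fun y hy => h2 y (by simp [hy]))

-- the inner loop is a running max written into slot i-1, reads untouched
lemma inner_run (i : Int) (dp0 : List Int) (bs : List Int) (v : Int)
    (hi : 0 ≤ i - 1) (hlen : (i - 1).toNat < dp0.length)
    (hbs : ∀ b ∈ bs, 0 ≤ b - 1 ∧ b - 1 < i - 1) :
    bs.foldl (fun dp b =>
        let curr := (i - b - 1) * PySem.List.pyGetD dp (b - 1) 0
        if curr > PySem.List.pyGetD dp (i - 1) 0 then dp.set (i - 1).toNat curr else dp)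
      (dp0.set (i - 1).toNat v)
    = dp0.set (i - 1).toNat
        (bs.foldl (fun acc b => max acc ((i - b - 1) * PySem.List.pyGetD dp0 (b - 1) 0)) v) := by
  induction bs generalizing v with
  | nil => rfl
  | cons b bs ih =>
    have hb := hbs b (by simp)
    have hblen : (b - 1).toNat < dp0.length := by omega
    have hbne : (b - 1).toNat ≠ (i - 1).toNat := by omega
    have hread : PySem.List.pyGetD (dp0.set (i - 1).toNat v) (b - 1) 0
        = PySem.List.pyGetD dp0 (b - 1) 0 := by
      rw [PySem.List.pyGetD_eq_getElem _ _ hb.1 (by simp only [List.length_set]; omega),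
          PySem.List.pyGetD_eq_getElem _ _ hb.1 (by omega)]
      exact List.getElem_set_ne (by omega) _
    have hself : PySem.List.pyGetD (dp0.set (i - 1).toNat v) (i - 1) 0 = v := by
      rw [PySem.List.pyGetD_eq_getElem _ _ hi (by simp only [List.length_set]; omega)]
      simp
    simp only [List.foldl_cons, hread, hself]
    split_ifs with hcv
    · rw [List.set_set, ih _ (fun y hy => hbs y (by simp [hy]))]
      congr 2
      omega
    · rw [ih _ (fun y hy => hbs y (by simp [hy]))]
      congr 2
      omega

-- the inner running max over all break points equals mu (m+1)
lemma scalar_max (N m : Nat) (h6 : 6 ≤ m) (hN : m + 1 ≤ N) :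
    (PySem.List.pyRange ((m : Int) + 1 - 3) 0 (-1)).foldl
      (fun acc b => max acc (((m : Int) + 1 - b - 1) * PySem.List.pyGetD (DD N m) (b - 1) 0)) 0
    = mu (m + 1) := by
  rw [← List.foldl_map]
  have hrec : mu (m + 1) = max (3 * mu (m - 3)) (4 * mu (m - 4)) := by
    rw [mu_rec (m + 1) (by omega), show m + 1 - 4 = m - 3 from by omega,
        show m + 1 - 5 = m - 4 from by omega]
  apply le_antisymm
  · apply foldl_max_le _ _ _ (mu_nonneg _)
    intro y hy
    rw [List.mem_map] at hy
    obtain ⟨b, hb, rfl⟩ := hy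
    rw [PySem.List.mem_pyRange_neg_one] at hb
    rw [DD_get N m (b - 1) (by omega) (by omega), if_pos (by omega),
        show (b - 1).toNat + 1 = b.toNat from by omega]
    have hmb := mu_bound (m + 1) b.toNat (by omega) (by omega) (by omega)
    have e : (m : Int) + 1 - b - 1 = ((m + 1 : Nat) : Int) - (b.toNat : Int) - 1 := by
      push_cast; omega
    rw [e]
    exact hmb
  · have m1 : (3 : Int) * mu (m - 3) ∈ (PySem.List.pyRange ((m : Int) + 1 - 3) 0 (-1)).map
        (fun b => ((m : Int) + 1 - b - 1) * PySem.List.pyGetD (DD N m) (b - 1) 0) := by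
      rw [List.mem_map]
      refine ⟨(m : Int) - 3, ?_, ?_⟩
      · rw [PySem.List.mem_pyRange_neg_one]; omega
      · rw [DD_get N m ((m : Int) - 3 - 1) (by omega) (by omega), if_pos (by omega),
            show ((m : Int) - 3 - 1).toNat + 1 = m - 3 from by omega]
        have : (m : Int) + 1 - ((m : Int) - 3) - 1 = 3 := by ring
        rw [this]
    have m2 : (4 : Int) * mu (m - 4) ∈ (PySem.List.pyRange ((m : Int) + 1 - 3) 0 (-1)).map
        (fun b => ((m : Int) + 1 - b - 1) * PySem.List.pyGetD (DD N m) (b - 1) 0) := by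
      rw [List.mem_map]
      refine ⟨(m : Int) - 4, ?_, ?_⟩
      · rw [PySem.List.mem_pyRange_neg_one]; omega
      · rw [DD_get N m ((m : Int) - 4 - 1) (by omega) (by omega), if_pos (by omega),
            show ((m : Int) - 4 - 1).toNat + 1 = m - 4 from by omega]
        have : (m : Int) + 1 - ((m : Int) - 4) - 1 = 4 := by ring
        rw [this]
    have hle := PySem.List.le_foldl_max ((PySem.List.pyRange ((m : Int) + 1 - 3) 0 (-1)).map
        (fun b => ((m : Int) + 1 - b - 1) * PySem.List.pyGetD (DD N m) (b - 1) 0)) 0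
    rw [hrec]
    exact max_le (hle.2 _ m1) (hle.2 _ m2)

-- the initialisation loop fills slots 0..5 with 1..6
lemma init_eq (N : Nat) (_h : 7 ≤ N) :
    (PySem.List.pyRange 1 7 1).foldl (fun dp i => dp.set (i - 1).toNat i)
      (List.replicate N (0 : Int)) = DD N 6 := by
  have hr : PySem.List.pyRange 1 7 1 = [1, 2, 3, 4, 5, 6] := by decide
  rw [hr]
  simp only [List.foldl_cons, List.foldl_nil]
  apply List.ext_getElem (by simp [DD])
  intro j hj hj'
  simp only [List.length_set, List.length_replicate] at hj
  simp only [DD, List.getElem_set, List.getElem_replicate, List.getElem_map, List.getElem_range]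
  by_cases h6 : j < 6
  · interval_cases j <;> simp <;> decide
  · rw [if_neg (by omega)]
    split_ifs <;> first | rfl | omega

-- the outer loop maintains dp = DD N m
lemma outer_eq (N t : Nat) (h : t + 6 ≤ N) :
    (PySem.List.pyRange 7 ((t : Int) + 7) 1).foldl
      (fun dp i => (PySem.List.pyRange (i - 3) 0 (-1)).foldl
        (fun dp b =>
          let curr := (i - b - 1) * PySem.List.pyGetD dp (b - 1) 0
          if curr > PySem.List.pyGetD dp (i - 1) 0 then dp.set (i - 1).toNat curr else dp) dp)
      (DD N 6) = DD N (t + 6) := by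
  induction t with
  | zero =>
    rw [show ((0 : Nat) : Int) + 7 = 7 from by norm_num,
        PySem.List.pyRange_one_eq_nil (by norm_num)]
    rfl
  | succ t ih =>
    have e1 : ((t + 1 : Nat) : Int) + 7 = ((t : Int) + 7) + 1 := by push_cast; ring
    rw [e1, PySem.List.pyRange_one_succ_right (by omega), List.foldl_append,
        ih (by omega), List.foldl_cons, List.foldl_nil]
    have e2 : (t : Int) + 7 = ((t + 6 : Nat) : Int) + 1 := by push_cast; ring
    rw [e2]
    set m := t + 6 with hm
    have hmN : m < N := by omega
    have hself : (DD N m)[m]'(by simp [DD]; omega) = 0 := by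
      simp [DD]
    have h0 : DD N m = (DD N m).set (((m : Int) + 1 - 1).toNat) 0 := by
      rw [show ((m : Int) + 1 - 1).toNat = m from by omega, ← hself, List.set_getElem_self]
    rw [h0, inner_run ((m : Int) + 1) (DD N m) _ 0 (by omega)
        (by rw [DD_length]; omega)
        (by intro b hb; rw [PySem.List.mem_pyRange_neg_one] at hb; constructor <;> omega)]
    rw [scalar_max N m (by omega) (by omega),
        show ((m : Int) + 1 - 1).toNat = m from by omega, DD_set N m hmN,
        show m + 1 = t + 1 + 6 from by omega]

-- B's loop maintains the window of the last five mu values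
lemma bside_eq (t : Nat) :
    (PySem.List.pyRange 7 ((t : Int) + 7) 1).foldl
      (fun w (_ : Int) =>
        let w := w ++ [max (3 * PySem.List.pyGetD w 1 0) (4 * PySem.List.pyGetD w 0 0)]
        w.tail) [2, 3, 4, 5, 6]
    = [mu (t + 2), mu (t + 3), mu (t + 4), mu (t + 5), mu (t + 6)] := by
  induction t with
  | zero =>
    rw [show ((0 : Nat) : Int) + 7 = 7 from by norm_num,
        PySem.List.pyRange_one_eq_nil (by norm_num)]
    decide
  | succ t ih =>
    have e1 : ((t + 1 : Nat) : Int) + 7 = ((t : Int) + 7) + 1 := by push_cast; ring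
    rw [e1, PySem.List.pyRange_one_succ_right (by omega), List.foldl_append, ih,
        List.foldl_cons, List.foldl_nil]
    simp only [show t + 1 + 2 = t + 3 from by omega, show t + 1 + 3 = t + 4 from by omega,
        show t + 1 + 4 = t + 5 from by omega, show t + 1 + 5 = t + 6 from by omega,
        show t + 1 + 6 = t + 7 from by omega]
    rw [mu_rec (t + 7) (by omega), show t + 7 - 4 = t + 3 from by omega,
        show t + 7 - 5 = t + 2 from by omega]
    rfl

-- ===== VERDICT (by name: the statement is the Claim_ definition above) =====
theorem opp_spec : Claim_equal_opp := by
  unfold Claim_equal_opp Spec_opp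
  intro n _
  by_cases h : n ≤ 6
  · simp [opp, opp_alt, h]
  · have hn7 : 7 ≤ n := by omega
    have hN : ((n.toNat : Int)) = n := by omega
    simp only [opp, opp_alt, if_neg h]
    rw [init_eq n.toNat (by omega)]
    have e1 : n + 1 = ((n.toNat - 6 : Nat) : Int) + 7 := by omega
    rw [e1, outer_eq n.toNat (n.toNat - 6) (by omega), bside_eq (n.toNat - 6),
        show n.toNat - 6 + 6 = n.toNat from by omega,
        DD_get n.toNat n.toNat (n - 1) (by omega) (by omega),
        if_pos (by omega), show (n - 1).toNat + 1 = n.toNat from by omega]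
    rw [show n.toNat - 6 + 2 = n.toNat - 4 from by omega,
        show n.toNat - 6 + 3 = n.toNat - 3 from by omega,
        show n.toNat - 6 + 4 = n.toNat - 2 from by omega,
        show n.toNat - 6 + 5 = n.toNat - 1 from by omega]
    rfl
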